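-- pv_equiv track=rewrite | github.com/umair-fa22/MegiLance | backend/app/services/moderation.py | _check_scam_indicators
-- ===== SOURCE A (Python) =====
-- def _check_scam_indicators(text: str) -> bool:
--     """Check for scam indicators."""
--     scam_phrases = [
--         "send money",
--         "wire transfer",
--         "western union",
--         "gift card",
--         "advance payment",
--         "pay upfront",
--         "too good to be true",
--         "guaranteed income",
--         "work from home $",
--         "make money fast"
--     ]
--
--     text_lower = text.lower()
--     return any(phrase in text_lower for phrase in scam_phrases)
-- ===== SOURCE B (Python) =====
-- def _check_scam_indicators(text: str) -> bool:
--     """Check for scam indicators."""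
--     # phrases indexed by their first character; values hold the remaining tail
--     buckets = {
--         's': ["end money"],
--         'w': ["ire transfer", "estern union", "ork from home $"],
--         'g': ["ift card", "uaranteed income"],
--         'a': ["dvance payment"],
--         'p': ["ay upfront"],
--         't': ["oo good to be true"],
--         'm': ["ake money fast"],
--     }
--     t = text.lower()
--     n = len(t)
--     i = 0
--     while i < n:
--         for tail in buckets.get(t[i], []):
--             if t.startswith(tail, i + 1):
--                 return True
--         i += 1
--     return False
-- ===== Notes on version B (the rewrite author's own statement) =====
-- stated objective: alternative
-- what changed: Replaces ten independent whole-text substring scans with a single left-to-right pass driven by a first-character index: phrases are stored in a dict keyed by their first letter, and at each position only the phrase tails filed under the current character are tested with startswith at that offset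
import Mathlib
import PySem

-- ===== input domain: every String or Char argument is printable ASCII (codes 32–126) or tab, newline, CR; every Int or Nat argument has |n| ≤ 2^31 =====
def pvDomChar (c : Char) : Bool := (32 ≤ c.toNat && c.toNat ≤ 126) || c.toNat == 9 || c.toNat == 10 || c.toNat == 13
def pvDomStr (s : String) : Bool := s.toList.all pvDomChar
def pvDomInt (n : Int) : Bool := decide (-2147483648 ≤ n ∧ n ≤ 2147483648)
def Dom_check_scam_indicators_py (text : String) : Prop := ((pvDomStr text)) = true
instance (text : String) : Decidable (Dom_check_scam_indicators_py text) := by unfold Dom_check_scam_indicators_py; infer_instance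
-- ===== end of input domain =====

-- B replaces ten independent whole-text substring scans with one left-to-right pass
-- dispatching on a first-character-indexed dict of phrase tails (objective: alternative).

-- ===== PORT A =====
def scamPhrasesA : List String := [
  "send money",
  "wire transfer",
  "western union",
  "gift card",
  "advance payment",
  "pay upfront",
  "too good to be true",
  "guaranteed income",
  "work from home $",
  "make money fast"]

def check_scam_indicators_py (text : String) : Bool :=
  let text_lower := PySem.Str.lower text
  scamPhrasesA.any (fun phrase => PySem.Str.isIn phrase text_lower)

-- ===== PORT B =====
-- the dict 'buckets': first character ↦ tails of the phrases starting with it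
def scamBuckets : PySem.Dict Char (List String) := PySem.Dict.mk [
  ('s', ["end money"]),
  ('w', ["ire transfer", "estern union", "ork from home $"]),
  ('g', ["ift card", "uaranteed income"]),
  ('a', ["dvance payment"]),
  ('p', ["ay upfront"]),
  ('t', ["oo good to be true"]),
  ('m', ["ake money fast"])]

-- the while-loop over positions, as structural recursion on the remaining characters:
-- t[i] is the head c, and t.startswith(tail, i+1) is the exact prefix test on the tail rest
-- (the offset i+1 is always in range here)
def scamScan : List Char → Bool
  | [] => false
  | c :: rest =>
      ((PySem.Dict.getD scamBuckets c []).any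
        (fun tail => PySem.Chars.startswith rest tail.toList)) || scamScan rest

def check_scam_indicators_py_alt (text : String) : Bool :=
  scamScan (PySem.Str.lower text).toList

-- ===== PRECONDITION & SPEC =====
def Spec_check_scam_indicators_py (text : String) (out : Bool) : Prop := out = check_scam_indicators_py_alt text
instance (text : String) (out : Bool) : Decidable (Spec_check_scam_indicators_py text out) := by unfold Spec_check_scam_indicators_py; infer_instance

-- ===== CLAIM =====
def Claim_equal_check_scam_indicators_py : Prop := ∀ (text : String), Dom_check_scam_indicators_py text → Spec_check_scam_indicators_py text (check_scam_indicators_py text)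

-- ===== LEMMAS AND PROOFS =====

-- one step of the scan at a position equals "some full phrase is a prefix here"
set_option maxRecDepth 4000 in
set_option maxHeartbeats 2000000 in
theorem scam_step (c : Char) (rest : List Char) :
    ((PySem.Dict.getD scamBuckets c []).any
        (fun tail => PySem.Chars.startswith rest tail.toList))
      = scamPhrasesA.any (fun p => PySem.Chars.startswith (c :: rest) p.toList) := by
  have hsw : ∀ (d : Char) (tl : List Char),
      PySem.Chars.startswith (c :: rest) (d :: tl) = ((c == d) && PySem.Chars.startswith rest tl) := by
    intro d tl
    apply Bool.eq_iff_iff.mpr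
    rw [PySem.Chars.startswith_iff, List.cons_prefix_cons, Bool.and_eq_true, beq_iff_eq,
      PySem.Chars.startswith_iff]
    exact ⟨fun ⟨h, hp⟩ => ⟨h.symm, hp⟩, fun ⟨h, hp⟩ => ⟨h.symm, hp⟩⟩
  have e1 : ("send money" : String).toList = 's' :: ("end money" : String).toList := rfl
  have e2 : ("wire transfer" : String).toList = 'w' :: ("ire transfer" : String).toList := rfl
  have e3 : ("western union" : String).toList = 'w' :: ("estern union" : String).toList := rfl
  have e4 : ("gift card" : String).toList = 'g' :: ("ift card" : String).toList := rfl
  have e5 : ("advance payment" : String).toList = 'a' :: ("dvance payment" : String).toList := rfl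
  have e6 : ("pay upfront" : String).toList = 'p' :: ("ay upfront" : String).toList := rfl
  have e7 : ("too good to be true" : String).toList = 't' :: ("oo good to be true" : String).toList := rfl
  have e8 : ("guaranteed income" : String).toList = 'g' :: ("uaranteed income" : String).toList := rfl
  have e9 : ("work from home $" : String).toList = 'w' :: ("ork from home $" : String).toList := rfl
  have e10 : ("make money fast" : String).toList = 'm' :: ("ake money fast" : String).toList := rfl
  simp only [scamPhrasesA, List.any_cons, List.any_nil, e1, e2, e3, e4, e5, e6, e7, e8, e9, e10, hsw]
  have hb : PySem.Dict.getD scamBuckets c [] =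
      (if 's' = c then ["end money"]
       else if 'w' = c then ["ire transfer", "estern union", "ork from home $"]
       else if 'g' = c then ["ift card", "uaranteed income"]
       else if 'a' = c then ["dvance payment"]
       else if 'p' = c then ["ay upfront"]
       else if 't' = c then ["oo good to be true"]
       else if 'm' = c then ["ake money fast"]
       else []) := by
    have m1 : ('s' == c) = decide ('s' = c) := rfl
    have m2 : ('w' == c) = decide ('w' = c) := rfl
    have m3 : ('g' == c) = decide ('g' = c) := rfl
    have m4 : ('a' == c) = decide ('a' = c) := rfl
    have m5 : ('p' == c) = decide ('p' = c) := rfl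
    have m6 : ('t' == c) = decide ('t' = c) := rfl
    have m7 : ('m' == c) = decide ('m' = c) := rfl
    simp only [scamBuckets, PySem.Dict.getD, PySem.Dict.get?, List.find?_cons, m1, m2, m3, m4, m5, m6, m7]
    split_ifs with g1 g2 g3 g4 g5 g6 g7
    · subst_vars; simp
    · subst_vars; simp
    · subst_vars; simp
    · subst_vars; simp
    · subst_vars; simp
    · subst_vars; simp
    · subst_vars; simp
    · simp [decide_eq_false g1, decide_eq_false g2, decide_eq_false g3, decide_eq_false g4,
        decide_eq_false g5, decide_eq_false g6, decide_eq_false g7]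
  rw [hb]
  split_ifs with h1 h2 h3 h4 h5 h6 h7
  case pos => subst_vars; simp
  case pos => subst_vars; simp
  case pos => subst_vars; simp
  case pos => subst_vars; simp
  case pos => subst_vars; simp
  case pos => subst_vars; simp
  case pos => subst_vars; simp
  have n1 : (c == 's') = false := beq_eq_false_iff_ne.mpr (fun h => h1 h.symm)
  have n2 : (c == 'w') = false := beq_eq_false_iff_ne.mpr (fun h => h2 h.symm)
  have n3 : (c == 'g') = false := beq_eq_false_iff_ne.mpr (fun h => h3 h.symm)
  have n4 : (c == 'a') = false := beq_eq_false_iff_ne.mpr (fun h => h4 h.symm)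
  have n5 : (c == 'p') = false := beq_eq_false_iff_ne.mpr (fun h => h5 h.symm)
  have n6 : (c == 't') = false := beq_eq_false_iff_ne.mpr (fun h => h6 h.symm)
  have n7 : (c == 'm') = false := beq_eq_false_iff_ne.mpr (fun h => h7 h.symm)
  simp [n1, n2, n3, n4, n5, n6, n7]

-- the scan finds exactly the positions where some phrase is a prefix of the suffix
theorem scamScan_eq (t : List Char) :
    scamScan t = scamPhrasesA.any (fun p => PySem.Chars.isIn p.toList t) := by
  induction t with
  | nil => simp [scamScan, scamPhrasesA, PySem.Chars.isIn_eq_false_iff]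
  | cons c rest ih =>
      rw [scamScan, scam_step, ih]
      apply Bool.eq_iff_iff.mpr
      simp only [List.any_eq_true, Bool.or_eq_true]
      constructor
      · rintro (⟨p, hp, hs⟩ | ⟨p, hp, hi⟩)
        · exact ⟨p, hp, by rw [PySem.Chars.isIn_iff_infix]; exact ((PySem.Chars.startswith_iff _ _).mp hs).isInfix⟩
        · exact ⟨p, hp, by rw [PySem.Chars.isIn_iff_infix] at hi ⊢; exact hi.trans (List.infix_cons_iff.mpr (Or.inr (List.infix_refl rest)) )⟩
      · rintro ⟨p, hp, hi⟩
        rw [PySem.Chars.isIn_iff_infix, List.infix_cons_iff] at hi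
        rcases hi with h | h
        · exact Or.inl ⟨p, hp, (PySem.Chars.startswith_iff _ _).mpr h⟩
        · exact Or.inr ⟨p, hp, (PySem.Chars.isIn_iff_infix _ _).mpr h⟩

-- ===== VERDICT =====
theorem check_scam_indicators_py_spec : Claim_equal_check_scam_indicators_py := by
  intro text _
  unfold Spec_check_scam_indicators_py check_scam_indicators_py check_scam_indicators_py_alt
  rw [scamScan_eq]
  simp [PySem.Str.isIn]
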